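-- pv_equiv track=rewrite | github.com/abhisaini/RL-GUI | compare.py | getCoordis
-- ===== SOURCE A (Python) =====
-- def getCoordis(path, scene):
--     if scene == 1:
--         x_c = 0
--         y_c = 0
--     elif scene == 3:
--         x_c = 9
--         y_c = 0
--     elif scene == 2:
--         x_c = 0
--         y_c = 9
--     elif scene == 4:
--         x_c = 9
--         y_c = 9
--     elif scene == 5:
--         x_c = 0
--         y_c = 0
--     coord_vis = [(y_c, x_c)]
--     for x in path:
--         if x == 0:
--             y_c -= 1
--         elif x == 1:
--             y_c += 1
--         elif x == 2:
--             x_c += 1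
--         elif x == 3:
--             x_c -= 1
--         coord_vis += [(y_c, x_c)]
--     return coord_vis
-- ===== SOURCE B (Python) =====
-- # B: same scene if/elif chain (unknown scene still raises UnboundLocalError),
-- # then a recursive prefix-scan over path with a delta table instead of a
-- # mutate-and-append loop with an if/elif chain per move.
-- DELTA = {0: (-1, 0), 1: (1, 0), 2: (0, 1), 3: (0, -1)}
--
-- def getCoordis(path, scene):
--     if scene == 1:
--         x_c = 0
--         y_c = 0
--     elif scene == 3:
--         x_c = 9
--         y_c = 0
--     elif scene == 2:
--         x_c = 0
--         y_c = 9
--     elif scene == 4: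
--         x_c = 9
--         y_c = 9
--     elif scene == 5:
--         x_c = 0
--         y_c = 0
--     def scan(pos, moves):
--         if not moves:
--             return [pos]
--         dy, dx = DELTA.get(moves[0], (0, 0))
--         return [pos] + scan((pos[0] + dy, pos[1] + dx), moves[1:])
--     return scan((y_c, x_c), path)
-- ===== Notes on version B (the rewrite author's own statement) =====
-- stated objective: alternative
-- what changed: Replaces the mutate-and-append loop with per-move if/elif arithmetic by a recursive prefix-scan over path that adds deltas looked up in a constant table; the scene if/elif chain is kept so an unknown scene still raises UnboundLocalError.
import Mathlib
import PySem

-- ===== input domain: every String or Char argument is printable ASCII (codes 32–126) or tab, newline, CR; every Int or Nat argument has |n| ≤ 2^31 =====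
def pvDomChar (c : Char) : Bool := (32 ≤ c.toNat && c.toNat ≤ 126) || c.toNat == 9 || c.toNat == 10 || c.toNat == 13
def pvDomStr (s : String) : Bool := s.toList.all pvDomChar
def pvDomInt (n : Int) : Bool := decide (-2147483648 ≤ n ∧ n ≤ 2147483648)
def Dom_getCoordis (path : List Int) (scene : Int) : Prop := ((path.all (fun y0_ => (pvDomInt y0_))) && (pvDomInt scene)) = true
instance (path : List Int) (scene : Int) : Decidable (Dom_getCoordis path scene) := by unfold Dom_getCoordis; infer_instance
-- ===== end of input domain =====

-- B replaces A's mutate-and-append loop (if/elif per move) by a recursive prefix-scan with a delta table; return values proved equal for every valid scene.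

-- ===== PORT A =====
-- the scene if/elif chain: none = UnboundLocalError (excluded by Pre_)
def pvInit (scene : Int) : Option (Int × Int) :=
  if scene == 1 then some (0, 0)
  else if scene == 3 then some (0, 9)
  else if scene == 2 then some (9, 0)
  else if scene == 4 then some (9, 9)
  else if scene == 5 then some (0, 0)
  else none

def getCoordis (path : List Int) (scene : Int) : List (Int × Int) :=
  match pvInit scene with
  | none => []
  | some (y0, x0) =>
    (path.foldl (fun (st : List (Int × Int) × Int × Int) x =>
        let vis := st.1
        let y_c := st.2.1
        let x_c := st.2.2
        let y_c := if x == 0 then y_c - 1 else if x == 1 then y_c + 1 else y_c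
        let x_c := if x == 0 ∨ x == 1 then x_c else if x == 2 then x_c + 1 else if x == 3 then x_c - 1 else x_c
        (vis ++ [(y_c, x_c)], y_c, x_c))
      ([(y0, x0)], y0, x0)).1

-- ===== PORT B =====
def pvDELTA : PySem.Dict Int (Int × Int) :=
  PySem.Dict.ofList [(0, (-1, 0)), (1, (1, 0)), (2, (0, 1)), (3, (0, -1))]

def pvScan (pos : Int × Int) (moves : List Int) : List (Int × Int) :=
  match moves with
  | [] => [pos]
  | m :: rest =>
    let d := pvDELTA.getD m (0, 0)
    [pos] ++ pvScan (pos.1 + d.1, pos.2 + d.2) rest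

def getCoordis_alt (path : List Int) (scene : Int) : List (Int × Int) :=
  match pvInit scene with
  | none => []
  | some p => pvScan p path

-- ===== PRECONDITION & SPEC =====
-- Pre_ excludes scenes outside {1,2,3,4,5}, on which Python A raises UnboundLocalError
def Pre_getCoordis (_path : List Int) (scene : Int) : Prop :=
  scene = 1 ∨ scene = 2 ∨ scene = 3 ∨ scene = 4 ∨ scene = 5
instance (path : List Int) (scene : Int) : Decidable (Pre_getCoordis path scene) := by unfold Pre_getCoordis; infer_instance
def pvWitness_getCoordis : List Int × Int := ([0, 2, 1, 3, 7], 2)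

def Spec_getCoordis (path : List Int) (scene : Int) (out : List (Int × Int)) : Prop := out = getCoordis_alt path scene
instance (path : List Int) (scene : Int) (out : List (Int × Int)) : Decidable (Spec_getCoordis path scene out) := by unfold Spec_getCoordis; infer_instance

-- ===== CLAIM (what is proved, stated in full; the proofs are below) =====
def Claim_equal_getCoordis : Prop := ∀ (path : List Int) (scene : Int), Dom_getCoordis path scene → Pre_getCoordis path scene → Spec_getCoordis path scene (getCoordis path scene)

-- ===== LEMMAS AND PROOFS =====

-- B's delta table as an if-chain
lemma getD_delta (m : Int) : pvDELTA.getD m (0, 0) =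
    if m = 0 then (-1, 0) else if m = 1 then (1, 0) else if m = 2 then (0, 1) else if m = 3 then (0, -1) else (0, 0) := by
  have h : pvDELTA = PySem.Dict.mk [(0, -1, 0), (1, 1, 0), (2, 0, 1), (3, 0, -1)] := by decide
  rw [h]
  simp only [PySem.Dict.getD, PySem.Dict.get?_mk_cons]
  by_cases h0 : m = 0
  · subst h0; rfl
  · by_cases h1 : m = 1
    · subst h1; rfl
    · by_cases h2 : m = 2
      · subst h2; rfl
      · by_cases h3 : m = 3
        · subst h3; rfl
        · rw [if_neg (by simp [Ne.symm h0]), if_neg (by simp [Ne.symm h1]),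
              if_neg (by simp [Ne.symm h2]), if_neg (by simp [Ne.symm h3]),
              if_neg h0, if_neg h1, if_neg h2, if_neg h3]
          rfl

-- one step of A's loop moves by exactly the delta B looks up
lemma step_delta (m y x : Int) :
    ((if m == 0 then y - 1 else if m == 1 then y + 1 else y),
     (if m == 0 ∨ m == 1 then x else if m == 2 then x + 1 else if m == 3 then x - 1 else x))
    = (y + (pvDELTA.getD m (0, 0)).1, x + (pvDELTA.getD m (0, 0)).2) := by
  rw [getD_delta]
  by_cases h0 : m = 0 <;> by_cases h1 : m = 1 <;> by_cases h2 : m = 2 <;> by_cases h3 : m = 3 <;>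
    simp [h0, h1, h2, h3] <;> omega

-- A's fold, started on any accumulated prefix, produces that prefix followed by B's scan tail
lemma fold_eq_scan (moves : List Int) : ∀ (acc : List (Int × Int)) (y x : Int),
    (moves.foldl (fun (st : List (Int × Int) × Int × Int) m =>
        let vis := st.1
        let y_c := st.2.1
        let x_c := st.2.2
        let y_c := if m == 0 then y_c - 1 else if m == 1 then y_c + 1 else y_c
        let x_c := if m == 0 ∨ m == 1 then x_c else if m == 2 then x_c + 1 else if m == 3 then x_c - 1 else x_c
        (vis ++ [(y_c, x_c)], y_c, x_c))
      (acc ++ [(y, x)], y, x)).1 = acc ++ pvScan (y, x) moves := by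
  induction moves with
  | nil => intro acc y x; simp [pvScan]
  | cons m rest ih =>
    intro acc y x
    simp only [List.foldl_cons]
    have hd := step_delta m y x
    have h1 : (if m == 0 then y - 1 else if m == 1 then y + 1 else y) = y + (pvDELTA.getD m (0, 0)).1 :=
      congrArg Prod.fst hd
    have h2 : (if m == 0 ∨ m == 1 then x else if m == 2 then x + 1 else if m == 3 then x - 1 else x) = x + (pvDELTA.getD m (0, 0)).2 :=
      congrArg Prod.snd hd
    simp only [h1, h2]
    have := ih (acc ++ [(y, x)]) (y + (pvDELTA.getD m (0, 0)).1) (x + (pvDELTA.getD m (0, 0)).2)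
    simp only [List.append_assoc] at this ⊢
    rw [this]
    simp [pvScan]

-- ===== VERDICT (by name: the statement is the Claim_ definition above) =====
theorem getCoordis_spec : Claim_equal_getCoordis := by
  intro path scene _ _
  unfold Spec_getCoordis getCoordis getCoordis_alt
  cases h : pvInit scene with
  | none => rfl
  | some p =>
    obtain ⟨y0, x0⟩ := p
    simpa using fold_eq_scan path [] y0 x0
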